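-- pv_equiv track=rewrite | github.com/18931118151212JC/poker | Players/agent_comparison_1vs1.py | get_cul
-- ===== SOURCE A (Python) =====
-- def get_cul(players_gain_history):
--     """
--     :param players_gain_history: Gain history over time
--     :return: the cumulative gain
--     """
--     n = len(players_gain_history[0])
--     cumulative_gain = [[0] * n]
--     for i in range(len(players_gain_history)):
--         cumulative_gain.append([0] * n)
--         for j in range(n):
--             cumulative_gain[-1][j] = players_gain_history[i][j] + cumulative_gain[i][j]
--
--     return cumulative_gain
-- ===== SOURCE B (Python) =====
-- def get_cul(players_gain_history):
--     """
--     :param players_gain_history: Gain history over time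
--     :return: the cumulative gain
--     """
--     n = len(players_gain_history[0])
--
--     def go(acc, rows):
--         if not rows:
--             return [acc]
--         nxt = [acc[j] + rows[0][j] for j in range(n)]
--         return [acc] + go(nxt, rows[1:])
--
--     return go([0] * n, players_gain_history)
-- ===== Notes on version B (the rewrite author's own statement) =====
-- stated objective: simpler
-- what changed: Replaces A's index-driven double loop that appends zero rows and reads the previous cumulative row back out of the growing output array by a recursive scan that threads the running cumulative row through the recursion.
import Mathlib
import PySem

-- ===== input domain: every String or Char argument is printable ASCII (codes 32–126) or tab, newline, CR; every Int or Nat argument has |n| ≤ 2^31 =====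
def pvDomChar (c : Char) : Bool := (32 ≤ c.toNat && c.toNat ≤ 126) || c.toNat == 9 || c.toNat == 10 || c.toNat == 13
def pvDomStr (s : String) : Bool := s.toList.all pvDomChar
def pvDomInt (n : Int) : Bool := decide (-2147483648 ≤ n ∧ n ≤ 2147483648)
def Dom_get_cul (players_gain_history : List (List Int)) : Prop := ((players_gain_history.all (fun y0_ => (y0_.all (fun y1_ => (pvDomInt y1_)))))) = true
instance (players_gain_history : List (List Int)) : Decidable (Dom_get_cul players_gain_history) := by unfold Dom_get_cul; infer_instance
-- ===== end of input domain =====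

-- B replaces A's index-driven double loop (append a zero row, write into it while reading the
-- previous cumulative row back out of the growing output) by a recursive scan threading the
-- running cumulative row; objective: simpler.


-- ===== PORT A =====
def get_cul (players_gain_history : List (List Int)) : List (List Int) :=
  let n : Nat := (PySem.List.pyGetD players_gain_history 0 []).length
  (PySem.List.pyRange 0 (players_gain_history.length : Int) 1).foldl
    (fun cg i =>
      (PySem.List.pyRange 0 (n : Int) 1).foldl
        (fun cg2 j =>
          PySem.List.pySetD cg2 (-1)
            (PySem.List.pySetD (PySem.List.pyGetD cg2 (-1) []) j
              (PySem.List.pyGetD (PySem.List.pyGetD players_gain_history i []) j 0 +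
               PySem.List.pyGetD (PySem.List.pyGetD cg2 i []) j 0)))
        (cg ++ [List.replicate n (0 : Int)]))
    [List.replicate n (0 : Int)]

-- ===== PORT B =====
def get_cul_alt_go (n : Nat) (acc : List Int) (rows : List (List Int)) : List (List Int) :=
  match rows with
  | [] => [acc]
  | r :: rest =>
      acc :: get_cul_alt_go n ((List.range n).map (fun j => acc.getD j 0 + r.getD j 0)) rest

def get_cul_alt (players_gain_history : List (List Int)) : List (List Int) :=
  let n : Nat := (PySem.List.pyGetD players_gain_history 0 []).length
  get_cul_alt_go n (List.replicate n 0) players_gain_history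

-- ===== PRECONDITION & SPEC =====
-- Pre_ excludes exactly the inputs where A raises IndexError: the empty history
-- (players_gain_history[0] fails) and histories with a row shorter than the first row
-- (players_gain_history[i][j] fails for some j < n).
def Pre_get_cul (players_gain_history : List (List Int)) : Prop :=
  players_gain_history ≠ [] ∧
  ∀ r ∈ players_gain_history, (players_gain_history.headD []).length ≤ r.length

instance (players_gain_history : List (List Int)) : Decidable (Pre_get_cul players_gain_history) := by
  unfold Pre_get_cul; infer_instance

def pvWitness_get_cul : List (List Int) := [[1, 2], [3, 4], [-1, 0]]

def Spec_get_cul (players_gain_history : List (List Int)) (out : List (List Int)) : Prop := out = get_cul_alt players_gain_history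
instance (players_gain_history : List (List Int)) (out : List (List Int)) : Decidable (Spec_get_cul players_gain_history out) := by unfold Spec_get_cul; infer_instance

-- ===== CLAIM (what is proved, stated in full; the proofs are below) =====
def Claim_equal_get_cul : Prop := ∀ (players_gain_history : List (List Int)), Dom_get_cul players_gain_history → Pre_get_cul players_gain_history → Spec_get_cul players_gain_history (get_cul players_gain_history)

-- ===== LEMMAS AND PROOFS =====

-- writing the last element of `xs ++ [x]` through Python's index -1
theorem pv_pySetD_neg_one_append_singleton {α : Type} (xs : List α) (x v : α) :
    PySem.List.pySetD (xs ++ [x]) (-1) v = xs ++ [v] := by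
  simp [PySem.List.pySetD, PySem.List.pySet?, PySem.List.pyIdx?]

-- the inner loop's effect on the freshly appended row, as a recursive "patch up to k"
def pvPatch (gv : Nat → Int) (cur : List Int) : Nat → List Int
  | 0 => cur
  | k+1 => (pvPatch gv cur k).set k (gv k)

theorem pvPatch_length (gv : Nat → Int) (cur : List Int) (k : Nat) :
    (pvPatch gv cur k).length = cur.length := by
  induction k with
  | zero => rfl
  | succ k ih => simp [pvPatch, ih]

theorem pvPatch_getElem (gv : Nat → Int) (cur : List Int) (k m : Nat) (hm : m < cur.length) :
    (pvPatch gv cur k)[m]'(by rw [pvPatch_length]; exact hm) = if m < k then gv m else cur[m] := by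
  induction k with
  | zero => simp [pvPatch]
  | succ k ih =>
      simp only [pvPatch]
      rw [List.getElem_set]
      by_cases hk : k = m
      · subst hk; simp
      · rw [if_neg hk, ih]
        by_cases h1 : m < k
        · rw [if_pos h1, if_pos (by omega)]
        · rw [if_neg h1, if_neg (by omega)]

theorem pvPatch_full (gv : Nat → Int) (cur : List Int) (n : Nat) (h : cur.length = n) :
    pvPatch gv cur n = (List.range n).map gv := by
  apply List.ext_getElem (by simp [pvPatch_length, h])
  intro m hm1 hm2
  have hmn : m < n := by simpa using hm2
  rw [pvPatch_getElem gv cur n m (by omega)]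
  simp [hmn]

-- the inner loop over range(k) starting from front ++ [cur]
theorem pv_inner_loop (xs front : List (List Int)) (prev : List Int) (i : Int)
    (hi0 : 0 ≤ i) (hilt : i.toNat < front.length)
    (hprev : front.getD i.toNat [] = prev)
    (k : Nat) (cur : List Int) :
    (PySem.List.pyRange 0 (k : Int) 1).foldl
      (fun cg2 j =>
        PySem.List.pySetD cg2 (-1)
          (PySem.List.pySetD (PySem.List.pyGetD cg2 (-1) []) j
            (PySem.List.pyGetD (PySem.List.pyGetD xs i []) j 0 +
             PySem.List.pyGetD (PySem.List.pyGetD cg2 i []) j 0)))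
      (front ++ [cur])
    = front ++ [pvPatch
        (fun j => PySem.List.pyGetD (PySem.List.pyGetD xs i []) (j : Int) 0 +
                  PySem.List.pyGetD prev (j : Int) 0) cur k] := by
  induction k with
  | zero =>
      rw [show ((0 : Nat) : Int) = 0 from rfl, PySem.List.pyRange_one_eq_nil le_rfl]
      rfl
  | succ k ih =>
      have hcast : ((k + 1 : Nat) : Int) = (k : Int) + 1 := by push_cast; ring
      rw [hcast, PySem.List.pyRange_one_succ_right (Int.natCast_nonneg k), List.foldl_append, ih]
      have hget : PySem.List.pyGetD (front ++ [pvPatch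
          (fun j => PySem.List.pyGetD (PySem.List.pyGetD xs i []) (j : Int) 0 +
                    PySem.List.pyGetD prev (j : Int) 0) cur k]) i [] = prev := by
        have hlen : i < ((front ++ [pvPatch
            (fun j => PySem.List.pyGetD (PySem.List.pyGetD xs i []) (j : Int) 0 +
                      PySem.List.pyGetD prev (j : Int) 0) cur k]).length : Int) := by
          simp only [List.length_append, List.length_cons, List.length_nil]
          omega
        rw [PySem.List.pyGetD_eq_getElem _ [] hi0 hlen, List.getElem_append_left hilt,
          ← List.getD_eq_getElem _ [] hilt, hprev]
      simp only [List.foldl_cons, List.foldl_nil, PySem.List.pyGetD_neg_one_append_singleton,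
        hget, PySem.List.pySetD_natCast, pv_pySetD_neg_one_append_singleton]
      rfl

theorem pv_go_head (n : Nat) (acc : List Int) (rows : List (List Int)) :
    get_cul_alt_go n acc rows = acc :: (get_cul_alt_go n acc rows).tail := by
  cases rows <;> rfl

-- the outer loop, by induction on the remaining rows
theorem pv_outer_loop (xs : List (List Int)) (n : Nat) :
    ∀ (rows : List (List Int)) (i : Nat) (front : List (List Int)) (acc : List Int),
    xs.drop i = rows →
    front.length = i + 1 →
    front.getD i [] = acc →
    acc.length = n →
    (∀ r ∈ rows, n ≤ r.length) →
    (PySem.List.pyRange (i : Int) (xs.length : Int) 1).foldl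
      (fun cg i' =>
        (PySem.List.pyRange 0 (n : Int) 1).foldl
          (fun cg2 j =>
            PySem.List.pySetD cg2 (-1)
              (PySem.List.pySetD (PySem.List.pyGetD cg2 (-1) []) j
                (PySem.List.pyGetD (PySem.List.pyGetD xs i' []) j 0 +
                 PySem.List.pyGetD (PySem.List.pyGetD cg2 i' []) j 0)))
          (cg ++ [List.replicate n (0 : Int)]))
      front
    = front ++ (get_cul_alt_go n acc rows).tail := by
  intro rows
  induction rows with
  | nil =>
      intro i front acc hdrop hflen hfget halen hrows
      have hle : xs.length ≤ i := List.drop_eq_nil_iff.mp hdrop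
      rw [PySem.List.pyRange_one_eq_nil (a := (i : Int)) (b := (xs.length : Int))
        (by exact_mod_cast hle)]
      simp [get_cul_alt_go]
  | cons r rest ih =>
      intro i front acc hdrop hflen hfget halen hrows
      have hi : i < xs.length := by
        by_contra h
        rw [List.drop_eq_nil_iff.mpr (by omega)] at hdrop
        exact absurd hdrop (by simp)
      have hxi : xs.getD i [] = r := by
        have h0 : (xs.drop i)[0]? = some r := by rw [hdrop]; rfl
        rw [List.getElem?_drop] at h0
        have h0' : xs[i]? = some r := by simpa using h0
        simp [List.getD_eq_getElem?_getD, h0']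
      rw [PySem.List.pyRange_one_cons (a := (i : Int)) (b := (xs.length : Int))
        (by exact_mod_cast hi)]
      simp only [List.foldl_cons]
      have hstep := pv_inner_loop xs front acc (i : Int) (Int.natCast_nonneg i)
        (by simp; omega) (by simpa using hfget) n (List.replicate n 0)
      rw [hstep, pvPatch_full _ _ n (by simp)]
      have hmap : List.map
            (fun (j : Nat) => PySem.List.pyGetD (PySem.List.pyGetD xs (i : Int) []) ((j : Int)) 0 +
                      PySem.List.pyGetD acc ((j : Int)) 0) (List.range n)
          = List.map (fun (j : Nat) => acc.getD j 0 + r.getD j 0) (List.range n) := by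
        apply List.map_congr_left
        intro j hj
        simp only [PySem.List.pyGetD_natCast, hxi]
        exact Int.add_comm _ _
      rw [hmap]
      have hdrop' : xs.drop (i + 1) = rest := by
        rw [← List.tail_drop, hdrop, List.tail_cons]
      have hrec := ih (i + 1)
        (front ++ [(List.range n).map (fun j => acc.getD j 0 + r.getD j 0)])
        ((List.range n).map (fun j => acc.getD j 0 + r.getD j 0))
        hdrop' (by simp [hflen])
        (by rw [show i + 1 = front.length from hflen.symm]
            simp [List.getD_eq_getElem?_getD])
        (by simp)
        (fun r' hr' => hrows r' (List.mem_cons_of_mem _ hr'))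
      rw [show ((i : Int) + 1) = ((i + 1 : Nat) : Int) by push_cast; ring, hrec]
      conv_rhs => rw [show get_cul_alt_go n acc (r :: rest)
        = acc :: get_cul_alt_go n ((List.range n).map (fun j => acc.getD j 0 + r.getD j 0)) rest
        from rfl]
      rw [List.tail_cons,
        pv_go_head n ((List.range n).map (fun j => acc.getD j 0 + r.getD j 0)) rest]
      simp

-- ===== VERDICT (by name: the statement is the Claim_ definition above) =====
theorem get_cul_spec : Claim_equal_get_cul := by
  intro xs hdom hpre
  obtain ⟨hne, hrows⟩ := hpre
  obtain ⟨r0, rest, rfl⟩ := List.exists_cons_of_ne_nil hne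
  unfold Spec_get_cul
  simp only [get_cul, get_cul_alt]
  have h := pv_outer_loop (r0 :: rest) (PySem.List.pyGetD (r0 :: rest) 0 []).length
      (r0 :: rest) 0
      [List.replicate (PySem.List.pyGetD (r0 :: rest) 0 []).length 0]
      (List.replicate (PySem.List.pyGetD (r0 :: rest) 0 []).length 0)
      (by simp) (by simp) (by simp) (by simp)
      (by intro r hr
          have hn : PySem.List.pyGetD (r0 :: rest) 0 [] = r0 := PySem.List.pyGetD_zero_cons _ _ _
          rw [hn]
          simpa using hrows r hr)
  rw [show ((0 : Nat) : Int) = 0 from rfl] at h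
  rw [h]
  conv_rhs => rw [pv_go_head]
  simp
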